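-- pv_equiv track=rewrite | github.com/AriiSM/UBB-Projects | 5th Semester/LFTC - Limbaje Formale si Tehnici de Compilare/Lab/Lab5/Activitate/main.py | is_productive
-- ===== SOURCE A (Python) =====
-- def is_productive(grammar,starter):
--     productive = set()
--     all_non_terminals = set(grammar.keys())
--     all_symbols = set()
--
--     productive.add(starter)
--     for non_terminal, rules in grammar.items():
--         for rule in rules:
--             all_symbols.update(rule)
--             if len(rule) == 1 and rule.islower():
--                 productive.add(non_terminal)
--                 break
--
--     changed = True
--     while changed:
--         changed = False
--         for non_terminal, rules in grammar.items():
--             if non_terminal not in productive: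
--                 for rule in rules:
--                     if all(symbol in productive or symbol.islower() for symbol in rule):
--                         productive.add(non_terminal)
--                         changed = True
--                         break
--
--     non_productive = all_non_terminals - productive
--
--     for symbol in all_symbols:
--         if symbol.isupper() and symbol not in grammar.keys():
--             non_productive.add(symbol)
--
--     return productive, non_productive
-- ===== SOURCE B (Python) =====
-- def is_productive(grammar, starter):
--     # Phase 1: seed scan (single lowercase rule => productive), collecting symbols.
--     productive = {starter}
--     all_symbols = set()
--     for nt, rules in grammar.items():
--         for rule in rules:
--             all_symbols.update(rule)
--             if len(rule) == 1 and rule.islower():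
--                 productive.add(nt)
--                 break
--     # Phase 2: a different bookkeeping structure: per-rule counters of unresolved
--     # symbol occurrences plus a symbol -> rule-occurrence index; a rule is ready
--     # when its counter is zero, and counters are decremented on resolution.
--     counts = {}   # rule id -> number of still-unresolved symbol occurrences
--     occ = {}      # symbol -> rule ids of its unresolved occurrences (with multiplicity)
--     owner = {}    # non-terminal -> its rule ids
--     pending = []  # unresolved non-terminals, grammar order
--     rid = 0
--     for nt, rules in grammar.items():
--         if nt in productive:
--             continue
--         ids = []
--         for rule in rules:
--             c = 0
--             for s in rule:
--                 if not (s.islower() or s in productive):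
--                     c += 1
--                     occ.setdefault(s, []).append(rid)
--             counts[rid] = c
--             ids.append(rid)
--             rid += 1
--         owner[nt] = ids
--         pending.append(nt)
--     while True:
--         still = []
--         for nt in pending:
--             if any(counts[r] == 0 for r in owner[nt]):
--                 productive.add(nt)
--                 for r in occ.get(nt, ()):
--                     counts[r] -= 1
--             else:
--                 still.append(nt)
--         if len(still) == len(pending):
--             break
--         pending = still
--     non_productive = set(pending)
--     for s in all_symbols:
--         if s.isupper() and s not in grammar:
--             non_productive.add(s)
--     return productive, non_productive
-- ===== Notes on version B (the rewrite author's own statement) =====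
-- stated objective: alternative
-- what changed: A's fixpoint rescans every rule with all() against the growing productive set each round; B builds, in one preprocessing pass, per-rule counters of unresolved symbol occurrences plus a symbol-to-rule occurrence index, and each round only tests counters for zero, decrementing them when a non-terminal becomes productive.
import Mathlib
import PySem

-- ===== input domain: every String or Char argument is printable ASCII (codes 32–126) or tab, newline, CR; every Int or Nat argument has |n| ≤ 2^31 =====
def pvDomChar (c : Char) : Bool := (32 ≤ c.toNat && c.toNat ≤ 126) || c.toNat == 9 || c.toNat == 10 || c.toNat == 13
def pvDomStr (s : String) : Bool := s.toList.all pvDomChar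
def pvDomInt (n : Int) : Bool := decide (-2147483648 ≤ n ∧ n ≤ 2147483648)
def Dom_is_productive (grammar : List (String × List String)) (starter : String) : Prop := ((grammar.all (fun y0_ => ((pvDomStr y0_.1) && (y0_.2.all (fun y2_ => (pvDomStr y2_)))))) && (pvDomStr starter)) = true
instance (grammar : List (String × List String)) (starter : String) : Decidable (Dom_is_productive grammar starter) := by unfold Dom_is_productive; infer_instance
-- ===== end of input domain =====

-- B replaces A's fixpoint of whole-rule all()-rescans by per-rule unresolved-symbol
-- counters with a symbol→occurrence index built once: a rule's readiness becomes a
-- counter==0 test and each symbol occurrence is decremented once when it resolves.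

-- shared seeding phase: both Pythons begin with the literally identical loop
-- 'for nt, rules: for rule: all_symbols.update(rule); if len(rule)==1 and rule.islower(): productive.add(nt); break'
def pvSeedRules (nt : String) (rs : List String) (p : PySem.Set String) (sym : PySem.Set Char) :
    PySem.Set String × PySem.Set Char :=
  match rs with
  | [] => (p, sym)
  | r :: t =>
    let sym' := PySem.Set.update sym r.toList
    match r.toList with
    | [c] => if PySem.Chars.islower c then (PySem.Set.add p nt, sym') else pvSeedRules nt t p sym'
    | _ => pvSeedRules nt t p sym'

def pvSeedA : List (String × List String) → PySem.Set String → PySem.Set Char →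
    PySem.Set String × PySem.Set Char
  | [], p, sym => (p, sym)
  | (nt, rs) :: t, p, sym =>
    let r := pvSeedRules nt rs p sym
    pvSeedA t r.1 r.2

-- ===== PORT A =====
-- the literal Python test 'all(symbol in productive or symbol.islower() for symbol in rule)'
def pvRuleOk (p : PySem.Set String) (r : String) : Bool :=
  r.toList.all (fun c => PySem.Set.contains p (String.ofList [c]) || PySem.Chars.islower c)

-- one execution of A's 'for non_terminal, rules in grammar.items()' body inside the while loop
def pvPassA : List (String × List String) → PySem.Set String → PySem.Set String × Bool
  | [], p => (p, false)
  | (nt, rs) :: t, p =>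
    if PySem.Set.contains p nt then pvPassA t p
    else if rs.any (fun r => pvRuleOk p r) then ((pvPassA t (PySem.Set.add p nt)).1, true)
    else pvPassA t p

-- A's 'while changed' loop; fuel items.length + 1 always suffices (each changed pass adds a distinct key)
def pvLoopA : Nat → List (String × List String) → PySem.Set String → PySem.Set String
  | 0, _, p => p
  | f + 1, items, p =>
    let r := pvPassA items p
    if r.2 then pvLoopA f items r.1 else r.1

def is_productive (grammar : List (String × List String)) (starter : String) :
    List String × List String :=
  let g := PySem.Dict.ofList grammar
  let items := g.items
  let s := pvSeedA items (PySem.Set.add (PySem.Set.empty) starter) PySem.Set.empty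
  let p := pvLoopA (items.length + 1) items s.1
  let np0 := PySem.Set.diff (PySem.Set.ofList g.keys) p
  let np := s.2.foldl (fun acc c =>
    if PySem.Chars.isupper c && !(PySem.Set.contains (PySem.Set.ofList g.keys) (String.ofList [c]))
    then PySem.Set.add acc (String.ofList [c]) else acc) np0
  (p, np)

-- ===== PORT B =====
-- 'for s in rule: if not (s.islower() or s in productive): c += 1; occ.setdefault(s,[]).append(rid)'
def pvInitChars (rid : Int) (p : PySem.Set String) :
    List Char → Int → PySem.Dict String (List Int) → Int × PySem.Dict String (List Int)
  | [], c, occ => (c, occ)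
  | s :: t, c, occ =>
    if !(PySem.Chars.islower s || PySem.Set.contains p (String.ofList [s])) then
      pvInitChars rid p t (c + 1)
        (occ.insert (String.ofList [s]) (occ.getD (String.ofList [s]) [] ++ [rid]))
    else pvInitChars rid p t c occ

-- 'for rule in rules: … counts[rid] = c; ids.append(rid); rid += 1'
def pvInitRules (p : PySem.Set String) :
    List String → PySem.Dict Int Int → PySem.Dict String (List Int) → List Int → Int →
    PySem.Dict Int Int × PySem.Dict String (List Int) × List Int × Int
  | [], counts, occ, ids, rid => (counts, occ, ids, rid)
  | r :: t, counts, occ, ids, rid =>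
    let z := pvInitChars rid p r.toList 0 occ
    pvInitRules p t (counts.insert rid z.1) z.2 (ids ++ [rid]) (rid + 1)

-- outer index-building pass: 'for nt, rules in grammar.items(): if nt in productive: continue; …'
-- returns (counts, occ, owner, pending, rid)
def pvInitB (p : PySem.Set String) :
    List (String × List String) → PySem.Dict Int Int → PySem.Dict String (List Int) →
    PySem.Dict String (List Int) → List String → Int →
    PySem.Dict Int Int × PySem.Dict String (List Int) × PySem.Dict String (List Int) × List String × Int
  | [], counts, occ, owner, pending, rid => (counts, occ, owner, pending, rid)
  | (nt, rs) :: t, counts, occ, owner, pending, rid =>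
    if PySem.Set.contains p nt then pvInitB p t counts occ owner pending rid
    else
      let z := pvInitRules p rs counts occ [] rid
      pvInitB p t z.1 z.2.1 (owner.insert nt z.2.2.1) (pending ++ [nt]) z.2.2.2

-- 'for r in occ.get(nt, ()): counts[r] -= 1'  (keys created in the init pass, so plain indexing)
def pvDecr (counts : PySem.Dict Int Int) (l : List Int) : PySem.Dict Int Int :=
  l.foldl (fun cs r => cs.insert r (cs.getD r 0 - 1)) counts

-- one 'for nt in pending' sweep: counter test, decrement on add, 'still' otherwise
def pvRoundC (owner occ : PySem.Dict String (List Int)) :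
    List String → PySem.Set String → PySem.Dict Int Int →
    PySem.Set String × PySem.Dict Int Int × List String
  | [], p, counts => (p, counts, [])
  | nt :: t, p, counts =>
    if (owner.getD nt []).any (fun r => counts.getD r 0 == 0) then
      pvRoundC owner occ t (PySem.Set.add p nt) (pvDecr counts (occ.getD nt []))
    else
      let z := pvRoundC owner occ t p counts
      (z.1, z.2.1, nt :: z.2.2)

theorem pvRoundC_len_le (owner occ : PySem.Dict String (List Int))
    (l : List String) (p : PySem.Set String) (counts : PySem.Dict Int Int) :
    (pvRoundC owner occ l p counts).2.2.length ≤ l.length := by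
  induction l generalizing p counts with
  | nil => simp [pvRoundC]
  | cons hd t ih =>
    simp only [pvRoundC]
    split
    · exact Nat.le_succ_of_le (ih _ _)
    · simpa using ih p counts

-- 'while True: … if len(still) == len(pending): break; pending = still'
def pvLoopC (owner occ : PySem.Dict String (List Int)) (pending : List String)
    (p : PySem.Set String) (counts : PySem.Dict Int Int) :
    PySem.Set String × List String :=
  let z := pvRoundC owner occ pending p counts
  if h : z.2.2.length = pending.length then (z.1, z.2.2)
  else pvLoopC owner occ z.2.2 z.1 z.2.1
termination_by pending.length
decreasing_by
  have := pvRoundC_len_le owner occ pending p counts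
  simp only [z] at h ⊢
  omega

def is_productive_alt (grammar : List (String × List String)) (starter : String) :
    List String × List String :=
  let g := PySem.Dict.ofList grammar
  let s := pvSeedA g.items (PySem.Set.add (PySem.Set.empty) starter) PySem.Set.empty
  let ini := pvInitB s.1 g.items PySem.Dict.empty PySem.Dict.empty PySem.Dict.empty [] 0
  let r := pvLoopC ini.2.2.1 ini.2.1 ini.2.2.2.1 s.1 ini.1
  let np0 := PySem.Set.ofList r.2
  let np := s.2.foldl (fun acc c =>
    if PySem.Chars.isupper c && !(g.contains (String.ofList [c]))
    then PySem.Set.add acc (String.ofList [c]) else acc) np0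
  (r.1, np)

-- ===== PRECONDITION & SPEC =====
def Spec_is_productive (grammar : List (String × List String)) (starter : String) (out : List String × List String) : Prop := out = is_productive_alt grammar starter
instance (grammar : List (String × List String)) (starter : String) (out : List String × List String) : Decidable (Spec_is_productive grammar starter out) := by unfold Spec_is_productive; infer_instance

-- ===== CLAIM (what is proved, stated in full; the proofs are below) =====
def Claim_equal_is_productive : Prop := ∀ (grammar : List (String × List String)) (starter : String), Dom_is_productive grammar starter → Spec_is_productive grammar starter (is_productive grammar starter)

-- ===== LEMMAS AND PROOFS =====

-- proof-side model of A's sweep as a round over the not-yet-productive items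
def pvRoundB : List (String × List String) → PySem.Set String →
    PySem.Set String × List (String × List String)
  | [], p => (p, [])
  | (nt, rs) :: t, p =>
    if rs.any (fun r => pvRuleOk p r) then pvRoundB t (PySem.Set.add p nt)
    else
      let r := pvRoundB t p
      (r.1, (nt, rs) :: r.2)

theorem pvRoundB_len_le (l : List (String × List String)) (p : PySem.Set String) :
    (pvRoundB l p).2.length ≤ l.length := by
  induction l generalizing p with
  | nil => simp [pvRoundB]
  | cons hd t ih =>
    obtain ⟨nt, rs⟩ := hd
    simp only [pvRoundB]
    split
    · exact Nat.le_succ_of_le (ih _)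
    · simpa using ih p

def pvLoopB (pending : List (String × List String)) (p : PySem.Set String) :
    PySem.Set String × List (String × List String) :=
  let r := pvRoundB pending p
  if h : r.2.length = pending.length then r
  else pvLoopB r.2 r.1
termination_by pending.length
decreasing_by
  have := pvRoundB_len_le pending p
  simp only [r] at h ⊢
  omega

def pvFlt (p : PySem.Set String) (items : List (String × List String)) :
    List (String × List String) :=
  items.filter (fun it => !(PySem.Set.contains p it.1))

-- counted unresolved occurrences of a rule's symbols w.r.t. a productive set
def pvUnres (p : PySem.Set String) (r : String) : Int :=
  ((r.toList.filter (fun c => !(PySem.Chars.islower c || PySem.Set.contains p (String.ofList [c])))).length : Int)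

-- the occurrence index is exact for rule id i with text r (w.r.t. the seed set p0)
def pvOccOK (occ : PySem.Dict String (List Int)) (p0 : PySem.Set String) (i : Int) (r : String) : Prop :=
  ∀ s : String, (occ.getD s []).count i
    = (r.toList.filter (fun c => (String.ofList [c] == s) && !(PySem.Chars.islower c || PySem.Set.contains p0 (String.ofList [c])))).length

theorem pvPassA_subset {t : List (String × List String)} {p : PySem.Set String}
    {x : String} (hx : x ∈ p) : x ∈ (pvPassA t p).1 := by
  induction t generalizing p with
  | nil => simpa [pvPassA] using hx
  | cons hd t ih =>
    obtain ⟨nt, rs⟩ := hd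
    simp only [pvPassA]
    split
    · exact ih hx
    · split
      · exact ih ((PySem.Set.mem_add _ _ _).2 (Or.inl hx))
      · exact ih hx

theorem pvPassA_mem {t : List (String × List String)} {p : PySem.Set String}
    {x : String} (hx : x ∈ (pvPassA t p).1) : x ∈ p ∨ x ∈ t.map Prod.fst := by
  induction t generalizing p with
  | nil => simp [pvPassA] at hx; exact Or.inl hx
  | cons hd t ih =>
    obtain ⟨nt, rs⟩ := hd
    simp only [pvPassA] at hx
    revert hx
    split
    · intro hx
      rcases ih hx with h | h
      · exact Or.inl h
      · exact Or.inr (by simp [h])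
    · split
      · intro hx
        rcases ih hx with h | h
        · rcases (PySem.Set.mem_add _ _ _).1 h with h' | h'
          · exact Or.inl h'
          · exact Or.inr (by simp [h'])
        · exact Or.inr (by simp [h])
      · intro hx
        rcases ih hx with h | h
        · exact Or.inl h
        · exact Or.inr (by simp [h])

theorem pvFlt_add_of_not_mem {t : List (String × List String)} {p : PySem.Set String}
    {nt : String} (h : nt ∉ t.map Prod.fst) : pvFlt (PySem.Set.add p nt) t = pvFlt p t := by
  induction t with
  | nil => simp [pvFlt]
  | cons hd t ih =>
    simp only [List.map_cons, List.mem_cons, not_or] at h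
    obtain ⟨h1, h2⟩ := h
    have hc : PySem.Set.contains (PySem.Set.add p nt) hd.1 = PySem.Set.contains p hd.1 := by
      rw [Bool.eq_iff_iff, PySem.Set.contains_iff, PySem.Set.contains_iff, PySem.Set.mem_add]
      constructor
      · rintro (h | h)
        · exact h
        · exact absurd h.symm h1
      · exact Or.inl
    simp only [pvFlt, List.filter_cons, hc] at *
    rw [ih h2]

theorem pvPass_eq (items : List (String × List String)) (p : PySem.Set String)
    (h : (items.map Prod.fst).Nodup) :
    (pvPassA items p).1 = (pvRoundB (pvFlt p items) p).1 ∧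
      ((pvPassA items p).2 = true ↔ (pvRoundB (pvFlt p items) p).2.length ≠ (pvFlt p items).length) ∧
      (pvRoundB (pvFlt p items) p).2 = pvFlt (pvPassA items p).1 items := by
  induction items generalizing p with
  | nil => simp [pvPassA, pvRoundB, pvFlt]
  | cons hd t ih =>
    obtain ⟨nt, rs⟩ := hd
    simp only [List.map_cons, List.nodup_cons] at h
    obtain ⟨hnt, ht⟩ := h
    by_cases hc : PySem.Set.contains p nt = true
    · have hm : nt ∈ p := (PySem.Set.contains_iff _ _).1 hc
      have hflt : pvFlt p ((nt, rs) :: t) = pvFlt p t := by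
        simp [pvFlt, hm]
      have hmQ : nt ∈ (pvPassA t p).1 := pvPassA_subset ((PySem.Set.contains_iff _ _).1 hc)
      obtain ⟨e1, e2, e3⟩ := ih p ht
      refine ⟨?_, ?_, ?_⟩
      · simpa only [pvPassA, hc, if_true, hflt] using e1
      · simpa only [pvPassA, hc, if_true, hflt] using e2
      · simp only [pvPassA, hc, if_true, hflt]
        rw [e3, pvFlt, pvFlt, List.filter_cons]
        rw [(PySem.Set.contains_iff _ _).2 hmQ]
        simp
    · have hcb : PySem.Set.contains p nt = false := by simpa using hc
      have hm' : nt ∉ p := fun hx => hc ((PySem.Set.contains_iff _ _).2 hx)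
      have hflt : pvFlt p ((nt, rs) :: t) = (nt, rs) :: pvFlt p t := by
        simp [pvFlt, hm']
      by_cases hf : rs.any (fun r => pvRuleOk p r) = true
      · have hadd : pvFlt p t = pvFlt (PySem.Set.add p nt) t := (pvFlt_add_of_not_mem hnt).symm
        obtain ⟨e1, e2, e3⟩ := ih (PySem.Set.add p nt) ht
        have hmQ : nt ∈ (pvPassA t (PySem.Set.add p nt)).1 :=
          pvPassA_subset ((PySem.Set.mem_add _ _ _).2 (Or.inr rfl))
        have hlen := pvRoundB_len_le (pvFlt (PySem.Set.add p nt) t) (PySem.Set.add p nt)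
        refine ⟨?_, ?_, ?_⟩
        · simp only [pvPassA, hcb, Bool.false_eq_true, if_false, hf, if_true, hflt, pvRoundB]
          rw [hadd]
          exact e1
        · simp only [pvPassA, hcb, Bool.false_eq_true, if_false, hf, if_true, hflt, pvRoundB]
          rw [hadd]
          simp only [List.length_cons]
          constructor
          · intro _
            omega
          · intro _
            trivial
        · simp only [pvPassA, hcb, Bool.false_eq_true, if_false, hf, if_true, hflt, pvRoundB]
          rw [hadd, e3, pvFlt, pvFlt, List.filter_cons]
          rw [(PySem.Set.contains_iff _ _).2 hmQ]
          simp
      · have hfb : rs.any (fun r => pvRuleOk p r) = false := by simpa using hf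
        obtain ⟨e1, e2, e3⟩ := ih p ht
        have hmQ : nt ∉ (pvPassA t p).1 := by
          intro hmem
          rcases pvPassA_mem hmem with h' | h'
          · rw [(PySem.Set.contains_iff _ _).2 h'] at hcb
            simp at hcb
          · exact hnt h'
        have hQ : PySem.Set.contains (pvPassA t p).1 nt = false :=
          Bool.eq_false_iff.2 (fun hx => hmQ ((PySem.Set.contains_iff _ _).1 hx))
        refine ⟨?_, ?_, ?_⟩
        · simp only [pvPassA, hcb, Bool.false_eq_true, if_false, hf, hflt, pvRoundB]
          exact e1
        · simp only [pvPassA, hcb, Bool.false_eq_true, if_false, hf, hflt, pvRoundB,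
            List.length_cons]
          rw [e2]
          omega
        · simp only [pvPassA, hcb, Bool.false_eq_true, if_false, hf, hflt, pvRoundB]
          rw [e3, pvFlt, pvFlt, List.filter_cons, hQ]
          simp

theorem pvLoop_eq (f : Nat) (items : List (String × List String)) (p : PySem.Set String)
    (h : (items.map Prod.fst).Nodup) (hf : (pvFlt p items).length < f) :
    pvLoopB (pvFlt p items) p = (pvLoopA f items p, pvFlt (pvLoopA f items p) items) := by
  induction f generalizing p with
  | zero => omega
  | succ f ih =>
    obtain ⟨e1, e2, e3⟩ := pvPass_eq items p h
    rw [pvLoopB]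
    simp only [pvLoopA]
    by_cases hcond : (pvRoundB (pvFlt p items) p).2.length = (pvFlt p items).length
    · have hch : (pvPassA items p).2 = false := by
        rw [Bool.eq_false_iff]
        intro htrue
        exact (e2.1 htrue) hcond
      rw [dif_pos hcond, hch]
      simp only [Bool.false_eq_true, if_false]
      exact Prod.ext e1.symm (by rw [e3])
    · have hch : (pvPassA items p).2 = true := e2.2 hcond
      rw [dif_neg hcond, hch, if_pos rfl]
      have hlen := pvRoundB_len_le (pvFlt p items) p
      have hlt : (pvFlt (pvPassA items p).1 items).length < f := by
        rw [← e3]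
        omega
      rw [e3, ← e1]
      exact ih (pvPassA items p).1 hlt

theorem pvContains_ofList_keys (g : PySem.Dict String (List String)) (x : String) :
    PySem.Set.contains (PySem.Set.ofList g.keys) x = g.contains x := by
  rw [Bool.eq_iff_iff, PySem.Set.contains_iff]
  rw [PySem.Set.mem_ofList]
  exact (PySem.Dict.contains_iff_mem_keys g x).symm

theorem pvMap_fst_flt (p : PySem.Set String) (items : List (String × List String)) :
    (pvFlt p items).map Prod.fst = (items.map Prod.fst).filter (fun x => !(PySem.Set.contains p x)) := by
  induction items with
  | nil => simp [pvFlt]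
  | cons hd t ih =>
    simp only [pvFlt, List.filter_cons, List.map_cons] at *
    by_cases hm : hd.1 ∈ p <;> simp [hm] at ih ⊢ <;> exact ih

-- ---- counter bookkeeping lemmas ----

theorem pvDecr_getD (l : List Int) (counts : PySem.Dict Int Int) (x : Int) :
    (pvDecr counts l).getD x 0 = counts.getD x 0 - (l.count x : Int) := by
  induction l generalizing counts with
  | nil => simp [pvDecr]
  | cons a t ih =>
    have hstep : pvDecr counts (a :: t) = pvDecr (counts.insert a (counts.getD a 0 - 1)) t := rfl
    rw [hstep, ih, PySem.Dict.getD_insert]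
    by_cases hx : x = a
    · subst hx
      rw [if_pos rfl, List.count_cons_self]
      push_cast
      ring
    · rw [if_neg hx, List.count_cons_of_ne (Ne.symm hx)]

theorem pvRuleOk_iff_unres (p : PySem.Set String) (r : String) :
    pvRuleOk p r = true ↔ pvUnres p r = 0 := by
  unfold pvRuleOk pvUnres
  rw [List.all_eq_true]
  rw [show ((((r.toList.filter (fun c => !(PySem.Chars.islower c || PySem.Set.contains p (String.ofList [c])))).length : Nat) : Int) = 0) ↔ (r.toList.filter (fun c => !(PySem.Chars.islower c || PySem.Set.contains p (String.ofList [c])))).length = 0 from by omega]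
  rw [List.length_eq_zero_iff, List.filter_eq_nil_iff]
  constructor
  · intro h c hc
    have h2 := h c hc
    cases h1 : PySem.Chars.islower c with
    | true => simp
    | false =>
      cases h3 : PySem.Set.contains p (String.ofList [c]) with
      | true => simp
      | false => rw [h1, h3] at h2; simp at h2
  · intro h c hc
    have h2 := h c hc
    cases h1 : PySem.Chars.islower c with
    | true => simp
    | false =>
      cases h3 : PySem.Set.contains p (String.ofList [c]) with
      | true => simp
      | false => rw [h1, h3] at h2; simp at h2

theorem pvUnres_add (p p0 : PySem.Set String) (nt r : String)
    (hp0 : ∀ x, x ∈ p0 → x ∈ p) (hnt : nt ∉ p) :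
    pvUnres (PySem.Set.add p nt) r
      = pvUnres p r - ((r.toList.filter (fun c => (String.ofList [c] == nt) && !(PySem.Chars.islower c || PySem.Set.contains p0 (String.ofList [c])))).length : Int) := by
  have hnt0 : nt ∉ p0 := fun h => hnt (hp0 _ h)
  unfold pvUnres
  induction r.toList with
  | nil => simp
  | cons c t ih =>
    simp only [List.filter_cons]
    by_cases heq : String.ofList [c] = nt
    · have hc1 : PySem.Set.contains (PySem.Set.add p nt) (String.ofList [c]) = true :=
        (PySem.Set.contains_iff _ _).2 ((PySem.Set.mem_add _ _ _).2 (Or.inr heq))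
      have hc2 : PySem.Set.contains p (String.ofList [c]) = false := by
        rw [heq]
        exact Bool.eq_false_iff.2 (fun hx => hnt ((PySem.Set.contains_iff _ _).1 hx))
      have hc3 : PySem.Set.contains p0 (String.ofList [c]) = false := by
        rw [heq]
        exact Bool.eq_false_iff.2 (fun hx => hnt0 ((PySem.Set.contains_iff _ _).1 hx))
      have hbeq : (String.ofList [c] == nt) = true := beq_iff_eq.2 heq
      rw [hc1, hc2, hc3, hbeq]
      cases hl : PySem.Chars.islower c
      · simp only [Bool.or_true, Bool.or_false, Bool.not_true, Bool.not_false, Bool.true_and,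
          if_false, if_true, List.length_cons, Bool.false_eq_true]
        push_cast
        push_cast at ih
        omega
      · simp only [Bool.true_or, Bool.not_true, Bool.true_and,
          Bool.false_eq_true, if_false]
        exact ih
    · have hbeq : (String.ofList [c] == nt) = false := by
        exact beq_eq_false_iff_ne.2 heq
      have hc1 : PySem.Set.contains (PySem.Set.add p nt) (String.ofList [c])
          = PySem.Set.contains p (String.ofList [c]) := by
        rw [Bool.eq_iff_iff, PySem.Set.contains_iff, PySem.Set.contains_iff, PySem.Set.mem_add]
        constructor
        · rintro (h | h)
          · exact h
          · exact absurd h heq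
        · exact Or.inl
      rw [hc1, hbeq]
      simp only [Bool.false_and, Bool.false_eq_true, if_false]
      cases hb : (!(PySem.Chars.islower c || PySem.Set.contains p (String.ofList [c])))
      · simp only [Bool.false_eq_true, if_false]
        exact ih
      · simp only [if_true, List.length_cons]
        push_cast
        push_cast at ih
        omega

theorem pvInitChars_spec (p0 : PySem.Set String) (rid : Int) (cs : List Char)
    (c0 : Int) (occ : PySem.Dict String (List Int)) :
    (pvInitChars rid p0 cs c0 occ).1
        = c0 + ((cs.filter (fun c => !(PySem.Chars.islower c || PySem.Set.contains p0 (String.ofList [c])))).length : Int) ∧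
      ∀ s i, ((pvInitChars rid p0 cs c0 occ).2.getD s []).count i
        = (occ.getD s []).count i
          + (if i = rid then (cs.filter (fun c => (String.ofList [c] == s) && !(PySem.Chars.islower c || PySem.Set.contains p0 (String.ofList [c])))).length else 0) := by
  induction cs generalizing c0 occ with
  | nil => simp [pvInitChars]
  | cons a t ih =>
    cases hb : (!(PySem.Chars.islower a || PySem.Set.contains p0 (String.ofList [a]))) with
    | false =>
      have hstep : pvInitChars rid p0 (a :: t) c0 occ = pvInitChars rid p0 t c0 occ := by
        simp only [pvInitChars, hb, Bool.false_eq_true, if_false]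
      rw [hstep]
      obtain ⟨ih1, ih2⟩ := ih c0 occ
      constructor
      · rw [ih1, List.filter_cons]
        simp only [hb, Bool.false_eq_true, if_false]
      · intro s i
        rw [ih2 s i, List.filter_cons]
        simp only [hb, Bool.and_false, Bool.false_eq_true, if_false]
    | true =>
      have hstep : pvInitChars rid p0 (a :: t) c0 occ
          = pvInitChars rid p0 t (c0 + 1)
              (occ.insert (String.ofList [a]) (occ.getD (String.ofList [a]) [] ++ [rid])) := by
        simp only [pvInitChars, hb, if_true]
      rw [hstep]
      obtain ⟨ih1, ih2⟩ := ih (c0 + 1) (occ.insert (String.ofList [a]) (occ.getD (String.ofList [a]) [] ++ [rid]))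
      constructor
      · rw [ih1, List.filter_cons]
        simp only [hb, if_true, List.length_cons]
        push_cast
        ring
      · intro s i
        rw [ih2 s i, PySem.Dict.getD_insert, List.filter_cons]
        by_cases hs : s = String.ofList [a]
        · subst hs
          have hbeq : (String.ofList [a] == String.ofList [a]) = true := beq_self_eq_true _
          rw [if_pos rfl, List.count_append]
          simp only [hbeq, Bool.true_and, hb, if_true, List.length_cons]
          by_cases hir : i = rid
          · subst hir
            have h1 : List.count i [i] = 1 := by simp
            rw [h1, if_pos rfl, if_pos rfl]
            omega
          · have h0 : List.count i [rid] = 0 := List.count_eq_zero.2 (by simp [hir])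
            rw [h0, if_neg hir, if_neg hir]
        · have hbeq : (String.ofList [a] == s) = false := beq_eq_false_iff_ne.2 (fun h => hs h.symm)
          rw [if_neg hs]
          simp only [hbeq, Bool.false_and, Bool.false_eq_true, if_false]

theorem pvInitRules_spec (p0 : PySem.Set String) (rs : List String)
    (counts : PySem.Dict Int Int) (occ : PySem.Dict String (List Int))
    (ids : List Int) (rid : Int)
    (hfresh : ∀ s i, rid ≤ i → (occ.getD s []).count i = 0) :
    (pvInitRules p0 rs counts occ ids rid).2.2.2 = rid + rs.length ∧
    (∃ newids, (pvInitRules p0 rs counts occ ids rid).2.2.1 = ids ++ newids ∧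
      List.Forall₂ (fun r i => rid ≤ i ∧ i < rid + (rs.length : Int) ∧
        (pvInitRules p0 rs counts occ ids rid).1.getD i 0 = pvUnres p0 r ∧
        pvOccOK (pvInitRules p0 rs counts occ ids rid).2.1 p0 i r) rs newids) ∧
    (∀ i, i < rid → (pvInitRules p0 rs counts occ ids rid).1.getD i 0 = counts.getD i 0) ∧
    (∀ s i, i < rid → ((pvInitRules p0 rs counts occ ids rid).2.1.getD s []).count i = (occ.getD s []).count i) ∧
    (∀ s i, rid + (rs.length : Int) ≤ i → ((pvInitRules p0 rs counts occ ids rid).2.1.getD s []).count i = 0) := by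
  induction rs generalizing counts occ ids rid with
  | nil =>
    refine ⟨by simp [pvInitRules], ⟨[], by simp [pvInitRules], by simp [pvInitRules]⟩,
      fun i _ => rfl, fun s i _ => rfl, fun s i hi => hfresh s i (by omega)⟩
  | cons r t ih =>
    obtain ⟨hc1, hc2⟩ := pvInitChars_spec p0 rid r.toList 0 occ
    have hfresh' : ∀ s i, rid + 1 ≤ i →
        (((pvInitChars rid p0 r.toList 0 occ).2).getD s []).count i = 0 := by
      intro s i hi
      rw [hc2 s i, if_neg (by omega), hfresh s i (by omega)]
    obtain ⟨e1, ⟨newids', hids, hfa⟩, ecp, eop, efr⟩ :=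
      ih (counts.insert rid (pvInitChars rid p0 r.toList 0 occ).1)
        (pvInitChars rid p0 r.toList 0 occ).2 (ids ++ [rid]) (rid + 1) hfresh'
    have hstep : pvInitRules p0 (r :: t) counts occ ids rid
        = pvInitRules p0 t (counts.insert rid (pvInitChars rid p0 r.toList 0 occ).1)
            (pvInitChars rid p0 r.toList 0 occ).2 (ids ++ [rid]) (rid + 1) := rfl
    simp only [hstep]
    have hlen : ((r :: t).length : Int) = (t.length : Int) + 1 := by rw [List.length_cons]; push_cast; ring
    refine ⟨by rw [e1, hlen]; ring, ⟨rid :: newids', by rw [hids]; simp, ?_⟩, ?_, ?_, ?_⟩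
    · refine List.Forall₂.cons ⟨le_refl rid, by rw [hlen]; omega, ?_, ?_⟩ ?_
      · rw [ecp rid (by omega), PySem.Dict.getD_insert, if_pos rfl, hc1]
        unfold pvUnres
        ring
      · intro s
        rw [eop s rid (by omega), hc2 s rid, if_pos rfl, hfresh s rid (le_refl rid)]
        omega
      · refine hfa.imp ?_
        intro a b hb
        exact ⟨by omega, by rw [hlen]; omega, hb.2.2.1, hb.2.2.2⟩
    · intro i hi
      rw [ecp i (by omega), PySem.Dict.getD_insert, if_neg (by omega)]
    · intro s i hi
      rw [eop s i (by omega), hc2 s i, if_neg (by omega)]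
      omega
    · intro s i hi
      exact efr s i (by rw [hlen] at hi; omega)

theorem pvInitB_spec (p0 : PySem.Set String) (items : List (String × List String))
    (counts : PySem.Dict Int Int) (occ owner : PySem.Dict String (List Int))
    (pending : List String) (rid : Int) (R0 : List (Int × String))
    (hfresh : ∀ s i, rid ≤ i → (occ.getD s []).count i = 0)
    (hR0 : ∀ ir ∈ R0, ir.1 < rid ∧ counts.getD ir.1 0 = pvUnres p0 ir.2 ∧ pvOccOK occ p0 ir.1 ir.2)
    (hnod : (items.map Prod.fst).Nodup) :
    (pvInitB p0 items counts occ owner pending rid).2.2.2.1 = pending ++ (pvFlt p0 items).map Prod.fst ∧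
    (∀ y, y ∉ items.map Prod.fst →
      (pvInitB p0 items counts occ owner pending rid).2.2.1.getD y [] = owner.getD y []) ∧
    ∃ R : List (Int × String),
      (∀ ir ∈ R, ir.1 < (pvInitB p0 items counts occ owner pending rid).2.2.2.2 ∧
        (pvInitB p0 items counts occ owner pending rid).1.getD ir.1 0 = pvUnres p0 ir.2 ∧
        pvOccOK (pvInitB p0 items counts occ owner pending rid).2.1 p0 ir.1 ir.2) ∧
      (∀ ir ∈ R0, ir ∈ R) ∧
      (∀ x ∈ pvFlt p0 items, List.Forall₂ (fun r i => (i, r) ∈ R) x.2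
        ((pvInitB p0 items counts occ owner pending rid).2.2.1.getD x.1 [])) := by
  induction items generalizing counts occ owner pending rid R0 with
  | nil =>
    refine ⟨by simp [pvInitB, pvFlt], fun y _ => rfl, R0, ?_, fun ir h => h, by simp [pvFlt]⟩
    intro ir hir
    exact hR0 ir hir
  | cons hd t ih =>
    obtain ⟨nt, rs⟩ := hd
    simp only [List.map_cons, List.nodup_cons] at hnod
    obtain ⟨hnt, hndt⟩ := hnod
    cases hc : PySem.Set.contains p0 nt with
    | true =>
      have hstep : pvInitB p0 ((nt, rs) :: t) counts occ owner pending rid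
          = pvInitB p0 t counts occ owner pending rid := by
        simp only [pvInitB, hc, if_true]
      have hflt : pvFlt p0 ((nt, rs) :: t) = pvFlt p0 t := by
        simp only [pvFlt, List.filter_cons, hc, Bool.not_true, Bool.false_eq_true, if_false]
      rw [hstep, hflt]
      obtain ⟨ih1, ih2, R, ihR⟩ := ih counts occ owner pending rid R0 hfresh hR0 hndt
      exact ⟨ih1, fun y hy => ih2 y (fun hm => hy (List.mem_cons_of_mem _ hm)), R, ihR⟩
    | false =>
      have hstep : pvInitB p0 ((nt, rs) :: t) counts occ owner pending rid
          = pvInitB p0 t (pvInitRules p0 rs counts occ [] rid).1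
              (pvInitRules p0 rs counts occ [] rid).2.1
              (owner.insert nt (pvInitRules p0 rs counts occ [] rid).2.2.1)
              (pending ++ [nt]) (pvInitRules p0 rs counts occ [] rid).2.2.2 := by
        simp only [pvInitB, hc, Bool.false_eq_true, if_false]
      have hflt : pvFlt p0 ((nt, rs) :: t) = (nt, rs) :: pvFlt p0 t := by
        simp only [pvFlt, List.filter_cons, hc, Bool.not_false, if_true]
      obtain ⟨e1, ⟨newids, hids, hfa⟩, ecp, eop, efr⟩ :=
        pvInitRules_spec p0 rs counts occ [] rid hfresh
      rw [List.nil_append] at hids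
      have hfresh' : ∀ s i, (pvInitRules p0 rs counts occ [] rid).2.2.2 ≤ i →
          ((pvInitRules p0 rs counts occ [] rid).2.1.getD s []).count i = 0 := by
        intro s i hi
        rw [e1] at hi
        exact efr s i hi
      have hR0' : ∀ ir ∈ R0 ++ (rs.zip newids).map (fun q => (q.2, q.1)),
          ir.1 < (pvInitRules p0 rs counts occ [] rid).2.2.2 ∧
          (pvInitRules p0 rs counts occ [] rid).1.getD ir.1 0 = pvUnres p0 ir.2 ∧
          pvOccOK (pvInitRules p0 rs counts occ [] rid).2.1 p0 ir.1 ir.2 := by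
        intro ir hir
        rcases List.mem_append.1 hir with h | h
        · obtain ⟨hb, hcnt, hocc⟩ := hR0 ir h
          refine ⟨by rw [e1]; omega, ?_, ?_⟩
          · rw [ecp ir.1 hb]
            exact hcnt
          · intro s
            rw [eop s ir.1 hb]
            exact hocc s
        · obtain ⟨q, hq, hqe⟩ := List.mem_map.1 h
          obtain ⟨h1, h2, h3, h4⟩ := List.forall₂_zip hfa hq
          subst hqe
          exact ⟨by rw [e1]; omega, h3, h4⟩
      obtain ⟨ih1, ih2, R, ihR1, ihR2, ihR3⟩ :=
        ih (pvInitRules p0 rs counts occ [] rid).1 (pvInitRules p0 rs counts occ [] rid).2.1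
          (owner.insert nt (pvInitRules p0 rs counts occ [] rid).2.2.1)
          (pending ++ [nt]) (pvInitRules p0 rs counts occ [] rid).2.2.2
          (R0 ++ (rs.zip newids).map (fun q => (q.2, q.1))) hfresh' hR0' hndt
      rw [hstep, hflt]
      have howner : (pvInitB p0 t (pvInitRules p0 rs counts occ [] rid).1
            (pvInitRules p0 rs counts occ [] rid).2.1
            (owner.insert nt (pvInitRules p0 rs counts occ [] rid).2.2.1)
            (pending ++ [nt]) (pvInitRules p0 rs counts occ [] rid).2.2.2).2.2.1.getD nt []
          = newids := by
        rw [ih2 nt hnt, PySem.Dict.getD_insert, if_pos rfl, hids]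
      refine ⟨by rw [ih1]; simp, ?_, R, ihR1, ?_, ?_⟩
      · intro y hy
        simp only [List.map_cons, List.mem_cons, not_or] at hy
        rw [ih2 y hy.2, PySem.Dict.getD_insert, if_neg hy.1]
      · intro ir hir
        exact ihR2 ir (List.mem_append_left _ hir)
      · intro x hx
        rcases List.mem_cons.1 hx with h | h
        · subst h
          rw [howner]
          refine (List.forall₂_iff_zip.2 ⟨hfa.length_eq, ?_⟩)
          intro a b hab
          exact ihR2 (b, a) (List.mem_append_right _ (List.mem_map.2 ⟨(a, b), hab, rfl⟩))
        · exact ihR3 x h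

theorem pvRoundB_subset {l : List (String × List String)} {p : PySem.Set String}
    {x : String} (hx : x ∈ p) : x ∈ (pvRoundB l p).1 := by
  induction l generalizing p with
  | nil => simpa [pvRoundB] using hx
  | cons hd t ih =>
    obtain ⟨nt, rs⟩ := hd
    simp only [pvRoundB]
    split
    · exact ih ((PySem.Set.mem_add _ _ _).2 (Or.inl hx))
    · exact ih hx

theorem pvRoundB_mem {l : List (String × List String)} {p : PySem.Set String}
    {x : String} (hx : x ∈ (pvRoundB l p).1) : x ∈ p ∨ x ∈ l.map Prod.fst := by
  induction l generalizing p with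
  | nil => simp [pvRoundB] at hx; exact Or.inl hx
  | cons hd t ih =>
    obtain ⟨nt, rs⟩ := hd
    simp only [pvRoundB] at hx
    revert hx
    split
    · intro hx
      rcases ih hx with h | h
      · rcases (PySem.Set.mem_add _ _ _).1 h with h' | h'
        · exact Or.inl h'
        · exact Or.inr (by simp [h'])
      · exact Or.inr (by simp [h])
    · intro hx
      rcases ih hx with h | h
      · exact Or.inl h
      · exact Or.inr (by simp [h])

theorem pvRoundB_still_sublist (l : List (String × List String)) (p : PySem.Set String) :
    (pvRoundB l p).2.Sublist l := by
  induction l generalizing p with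
  | nil => simp [pvRoundB]
  | cons hd t ih =>
    obtain ⟨nt, rs⟩ := hd
    simp only [pvRoundB]
    split
    · exact (ih _).cons _
    · exact (ih _).cons₂ _

theorem pvRoundB_still_not_mem (l : List (String × List String)) (p : PySem.Set String)
    (hnod : (l.map Prod.fst).Nodup) (hp : ∀ x ∈ l, x.1 ∉ p) :
    ∀ x ∈ (pvRoundB l p).2, x.1 ∉ (pvRoundB l p).1 := by
  induction l generalizing p with
  | nil => simp [pvRoundB]
  | cons hd t ih =>
    obtain ⟨nt, rs⟩ := hd
    simp only [List.map_cons, List.nodup_cons] at hnod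
    obtain ⟨hnt, hndt⟩ := hnod
    simp only [pvRoundB]
    split
    · refine ih (PySem.Set.add p nt) hndt ?_
      intro x hx hmem
      rcases (PySem.Set.mem_add _ _ _).1 hmem with h | h
      · exact hp x (List.mem_cons_of_mem _ hx) h
      · exact hnt (h ▸ List.mem_map.2 ⟨x, hx, rfl⟩)
    · intro x hx
      rcases List.mem_cons.1 hx with h | h
      · subst h
        intro hmem
        rcases pvRoundB_mem hmem with h' | h'
        · exact hp (nt, rs) (List.mem_cons_self) h'
        · exact hnt h'
      · exact ih p hndt (fun y hy => hp y (List.mem_cons_of_mem _ hy)) x h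

theorem pvAny_congr {α β : Type} {P : α → β → Prop} {l1 : List α} {l2 : List β}
    {f : β → Bool} {g : α → Bool} (h : List.Forall₂ P l1 l2)
    (hpt : ∀ a b, P a b → f b = g a) : l2.any f = l1.any g := by
  induction h with
  | nil => rfl
  | cons hab _ ih => simp [List.any_cons, ih, hpt _ _ hab]

theorem pvRoundC_eq (owner occ : PySem.Dict String (List Int)) (p0 : PySem.Set String)
    (pend : List (String × List String)) (p : PySem.Set String)
    (counts : PySem.Dict Int Int) (R : List (Int × String))
    (hR1 : ∀ ir ∈ R, pvOccOK occ p0 ir.1 ir.2)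
    (hR2 : ∀ ir ∈ R, counts.getD ir.1 0 = pvUnres p ir.2)
    (hown : ∀ x ∈ pend, List.Forall₂ (fun r i => (i, r) ∈ R) x.2 (owner.getD x.1 []))
    (hnod : (pend.map Prod.fst).Nodup)
    (hp : ∀ x ∈ pend, x.1 ∉ p)
    (hp0 : ∀ y, y ∈ p0 → y ∈ p) :
    (pvRoundC owner occ (pend.map Prod.fst) p counts).1 = (pvRoundB pend p).1 ∧
    (pvRoundC owner occ (pend.map Prod.fst) p counts).2.2 = (pvRoundB pend p).2.map Prod.fst ∧
    ∀ ir ∈ R, (pvRoundC owner occ (pend.map Prod.fst) p counts).2.1.getD ir.1 0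
      = pvUnres (pvRoundB pend p).1 ir.2 := by
  induction pend generalizing p counts with
  | nil => exact ⟨rfl, rfl, fun ir hir => hR2 ir hir⟩
  | cons hd t ih =>
    obtain ⟨nt, rs⟩ := hd
    simp only [List.map_cons, List.nodup_cons] at hnod
    obtain ⟨hnt, hndt⟩ := hnod
    have htest : ((owner.getD nt []).any (fun r => counts.getD r 0 == 0))
        = rs.any (fun r => pvRuleOk p r) := by
      refine pvAny_congr (hown (nt, rs) List.mem_cons_self) ?_
      intro r i hir
      rw [Bool.eq_iff_iff, beq_iff_eq, hR2 (i, r) hir]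
      exact ((pvRuleOk_iff_unres p r).symm)
    have hntp : nt ∉ p := hp (nt, rs) List.mem_cons_self
    cases hb : rs.any (fun r => pvRuleOk p r) with
    | true =>
      have hstepC : pvRoundC owner occ (((nt, rs) :: t).map Prod.fst) p counts
          = pvRoundC owner occ (t.map Prod.fst) (PySem.Set.add p nt)
              (pvDecr counts (occ.getD nt [])) := by
        simp only [List.map_cons, pvRoundC, htest, hb, if_true]
      have hstepB : pvRoundB ((nt, rs) :: t) p = pvRoundB t (PySem.Set.add p nt) := by
        simp only [pvRoundB, hb, if_true]
      rw [hstepC, hstepB]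
      have hR2' : ∀ ir ∈ R, (pvDecr counts (occ.getD nt [])).getD ir.1 0
          = pvUnres (PySem.Set.add p nt) ir.2 := by
        intro ir hir
        rw [pvDecr_getD, hR2 ir hir, hR1 ir hir nt,
          pvUnres_add p p0 nt ir.2 hp0 hntp]
      refine ih (PySem.Set.add p nt) (pvDecr counts (occ.getD nt [])) hR2'
        (fun x hx => hown x (List.mem_cons_of_mem _ hx)) hndt ?_ ?_
      · intro x hx hmem
        rcases (PySem.Set.mem_add _ _ _).1 hmem with h | h
        · exact hp x (List.mem_cons_of_mem _ hx) h
        · exact hnt (h ▸ List.mem_map.2 ⟨x, hx, rfl⟩)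
      · intro y hy
        exact (PySem.Set.mem_add _ _ _).2 (Or.inl (hp0 y hy))
    | false =>
      have hstepC : pvRoundC owner occ (((nt, rs) :: t).map Prod.fst) p counts
          = ((pvRoundC owner occ (t.map Prod.fst) p counts).1,
             (pvRoundC owner occ (t.map Prod.fst) p counts).2.1,
             nt :: (pvRoundC owner occ (t.map Prod.fst) p counts).2.2) := by
        simp only [List.map_cons, pvRoundC, htest, hb, Bool.false_eq_true, if_false]
      have hstepB : pvRoundB ((nt, rs) :: t) p
          = ((pvRoundB t p).1, (nt, rs) :: (pvRoundB t p).2) := by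
        simp only [pvRoundB, hb, Bool.false_eq_true, if_false]
      rw [hstepC, hstepB]
      obtain ⟨e1, e2, e3⟩ := ih p counts hR2
        (fun x hx => hown x (List.mem_cons_of_mem _ hx)) hndt
        (fun x hx => hp x (List.mem_cons_of_mem _ hx)) hp0
      exact ⟨e1, by rw [List.map_cons, e2], e3⟩

theorem pvLoopC_eq (owner occ : PySem.Dict String (List Int)) (p0 : PySem.Set String)
    (n : Nat) (pend : List (String × List String)) (p : PySem.Set String)
    (counts : PySem.Dict Int Int) (R : List (Int × String))
    (hn : pend.length ≤ n)
    (hR1 : ∀ ir ∈ R, pvOccOK occ p0 ir.1 ir.2)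
    (hR2 : ∀ ir ∈ R, counts.getD ir.1 0 = pvUnres p ir.2)
    (hown : ∀ x ∈ pend, List.Forall₂ (fun r i => (i, r) ∈ R) x.2 (owner.getD x.1 []))
    (hnod : (pend.map Prod.fst).Nodup)
    (hp : ∀ x ∈ pend, x.1 ∉ p)
    (hp0 : ∀ y, y ∈ p0 → y ∈ p) :
    pvLoopC owner occ (pend.map Prod.fst) p counts
      = ((pvLoopB pend p).1, (pvLoopB pend p).2.map Prod.fst) := by
  induction n generalizing pend p counts with
  | zero =>
    have hpe : pend = [] := List.length_eq_zero_iff.1 (Nat.le_zero.1 hn)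
    subst hpe
    rw [pvLoopC, pvLoopB]
    simp [pvRoundC, pvRoundB]
  | succ n ihn =>
    obtain ⟨e1, e2, e3⟩ := pvRoundC_eq owner occ p0 pend p counts R hR1 hR2 hown hnod hp hp0
    rw [pvLoopC, pvLoopB]
    have hlen : (pvRoundC owner occ (pend.map Prod.fst) p counts).2.2.length
        = (pvRoundB pend p).2.length := by
      rw [e2, List.length_map]
    by_cases hcond : (pvRoundB pend p).2.length = pend.length
    · rw [dif_pos (by rw [hlen, hcond, List.length_map]), dif_pos hcond]
      exact Prod.ext e1 e2
    · rw [dif_neg (by rw [hlen, List.length_map]; exact hcond), dif_neg hcond]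
      have hsub := pvRoundB_still_sublist pend p
      have hlt : (pvRoundB pend p).2.length < pend.length := by
        have := pvRoundB_len_le pend p
        omega
      rw [e2, e1]
      refine ihn (pvRoundB pend p).2 (pvRoundB pend p).1
        (pvRoundC owner occ (pend.map Prod.fst) p counts).2.1 (by omega) ?_ ?_ ?_ ?_ ?_
      · intro ir hir
        exact e3 ir hir
      · intro x hx
        exact hown x (hsub.mem hx)
      · exact hnod.sublist (hsub.map Prod.fst)
      · exact pvRoundB_still_not_mem pend p hnod hp
      · intro y hy
        exact pvRoundB_subset (hp0 y hy)

-- ===== VERDICT (by name: the statement is the Claim_ definition above) =====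
theorem is_productive_spec : Claim_equal_is_productive := by
  intro grammar starter _
  unfold Spec_is_productive
  have hkeys : (PySem.Dict.ofList grammar : PySem.Dict String (List String)).keys
      = (PySem.Dict.ofList grammar).items.map Prod.fst := rfl
  have hnd : (((PySem.Dict.ofList grammar : PySem.Dict String (List String)).items.map Prod.fst)).Nodup := by
    have := PySem.Dict.nodup_keys_ofList (ν := List String) grammar
    rwa [hkeys] at this
  have hnp0 : ∀ P : PySem.Set String,
      PySem.Set.diff (PySem.Set.ofList (PySem.Dict.ofList grammar : PySem.Dict String (List String)).keys) P
        = PySem.Set.ofList ((pvFlt P (PySem.Dict.ofList grammar).items).map Prod.fst) := by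
    intro P
    have h1 : ((pvFlt P (PySem.Dict.ofList grammar).items).map Prod.fst).Nodup := by
      rw [pvMap_fst_flt]
      exact List.Nodup.filter _ hnd
    have h2 : ((PySem.Dict.ofList grammar : PySem.Dict String (List String)).keys).Nodup := by
      rw [hkeys]
      exact hnd
    rw [PySem.Set.ofList_eq_self_of_nodup _ h1, PySem.Set.ofList_eq_self_of_nodup _ h2, pvMap_fst_flt]
    rfl
  simp only [is_productive, is_productive_alt]
  have hfresh0 : ∀ (s : String) (i : Int), (0 : Int) ≤ i →
      (((PySem.Dict.empty : PySem.Dict String (List Int))).getD s []).count i = 0 := by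
    intro s i _
    rfl
  obtain ⟨hpend, hopres, R, hRfacts, hRsub, hfa⟩ :=
    pvInitB_spec (pvSeedA (PySem.Dict.ofList grammar).items (PySem.Set.add (PySem.Set.empty) starter) PySem.Set.empty).1
      (PySem.Dict.ofList grammar).items PySem.Dict.empty PySem.Dict.empty PySem.Dict.empty [] 0 []
      hfresh0 (by simp) hnd
  rw [List.nil_append] at hpend
  rw [hpend]
  have hploop := pvLoopC_eq
    (pvInitB (pvSeedA (PySem.Dict.ofList grammar).items (PySem.Set.add (PySem.Set.empty) starter) PySem.Set.empty).1
      (PySem.Dict.ofList grammar).items PySem.Dict.empty PySem.Dict.empty PySem.Dict.empty [] 0).2.2.1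
    (pvInitB (pvSeedA (PySem.Dict.ofList grammar).items (PySem.Set.add (PySem.Set.empty) starter) PySem.Set.empty).1
      (PySem.Dict.ofList grammar).items PySem.Dict.empty PySem.Dict.empty PySem.Dict.empty [] 0).2.1
    (pvSeedA (PySem.Dict.ofList grammar).items (PySem.Set.add (PySem.Set.empty) starter) PySem.Set.empty).1
    ((pvFlt (pvSeedA (PySem.Dict.ofList grammar).items (PySem.Set.add (PySem.Set.empty) starter) PySem.Set.empty).1
        (PySem.Dict.ofList grammar).items).length)
    (pvFlt (pvSeedA (PySem.Dict.ofList grammar).items (PySem.Set.add (PySem.Set.empty) starter) PySem.Set.empty).1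
        (PySem.Dict.ofList grammar).items)
    (pvSeedA (PySem.Dict.ofList grammar).items (PySem.Set.add (PySem.Set.empty) starter) PySem.Set.empty).1
    (pvInitB (pvSeedA (PySem.Dict.ofList grammar).items (PySem.Set.add (PySem.Set.empty) starter) PySem.Set.empty).1
      (PySem.Dict.ofList grammar).items PySem.Dict.empty PySem.Dict.empty PySem.Dict.empty [] 0).1
    R (le_refl _)
    (fun ir hir => (hRfacts ir hir).2.2)
    (fun ir hir => (hRfacts ir hir).2.1)
    (fun x hx => hfa x hx)
    (by rw [pvMap_fst_flt]; exact List.Nodup.filter _ hnd)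
    (by
      intro x hx hmem
      have hcf := List.of_mem_filter hx
      rw [(PySem.Set.contains_iff _ _).2 hmem] at hcf
      simp at hcf)
    (fun y hy => hy)
  rw [hploop]
  rw [pvLoop_eq ((PySem.Dict.ofList grammar).items.length + 1) _ _ hnd
    (lt_of_le_of_lt (List.length_filter_le _ _) (Nat.lt_succ_self _))]
  refine Prod.ext rfl ?_
  simp only [pvContains_ofList_keys]
  rw [hnp0]
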